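-- pv_equiv track=rewrite | github.com/busebd12/InterviewPreparation | LeetCode/Python/Medium/1743-Restore-the-Array-From-Adjacent-Pairs/solution.py | get_starting_node
-- ===== SOURCE A (Python) =====
-- from typing import List
--
-- def get_starting_node(adjacentPairs: List[List[int]]) -> int:
--     frequencies: Dict[int, int]=dict()
--
--     for pair in adjacentPairs:
--         u: int=pair[0]
--
--         v: int=pair[1]
--
--         if u not in frequencies.keys():
--             frequencies[u]=1
--         else:
--             frequencies[u]+=1
--
--         if v not in frequencies.keys():
--             frequencies[v]=1
--         else:
--             frequencies[v]+=1
--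
--     starting_node: int=-1
--
--     for (number, frequency) in frequencies.items():
--         if frequency==1:
--             starting_node=number
--
--             break
--
--     return starting_node
-- ===== SOURCE B (Python) =====
-- def get_starting_node(adjacentPairs):
--     nodes = []
--     for pair in adjacentPairs:
--         nodes.append(pair[0])
--         nodes.append(pair[1])
--     s = sorted(nodes)
--     singles = set()
--     i = 0
--     while i < len(s):
--         j = i + 1
--         while j < len(s) and s[j] == s[i]:
--             j += 1
--         if j == i + 1:
--             singles.add(s[i])
--         i = j
--     for x in nodes:
--         if x in singles:
--             return x
--     return -1
-- ===== Notes on version B (the rewrite author's own statement) =====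
-- stated objective: alternative
-- what changed: B replaces the counting dict and its dict-order scan by sort-then-group: flatten the pairs, sort the flat node list, collect values whose equal-run has length 1 (no counters at all), then return the first flat-order node in that set.
import Mathlib
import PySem

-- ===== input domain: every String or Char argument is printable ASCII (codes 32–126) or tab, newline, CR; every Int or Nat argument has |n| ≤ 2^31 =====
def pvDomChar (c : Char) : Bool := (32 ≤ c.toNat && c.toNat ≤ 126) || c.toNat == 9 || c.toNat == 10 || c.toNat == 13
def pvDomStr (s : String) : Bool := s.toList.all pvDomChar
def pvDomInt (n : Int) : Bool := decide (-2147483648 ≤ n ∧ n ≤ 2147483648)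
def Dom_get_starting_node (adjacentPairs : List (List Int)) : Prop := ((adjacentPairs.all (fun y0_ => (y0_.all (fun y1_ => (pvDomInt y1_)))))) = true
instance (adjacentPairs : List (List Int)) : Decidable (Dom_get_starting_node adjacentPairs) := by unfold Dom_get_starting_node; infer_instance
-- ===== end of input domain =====

-- B replaces A's counting dict + dict-order scan by sort-then-group: sort the flat node
-- list, collect values whose equal-run has length 1, return the first flat-order node in
-- that set (objective: alternative).

-- ===== PORT A =====
-- one body-iteration of A's counting loop for a single node x
def pvBumpA (d : PySem.Dict Int Int) (x : Int) : PySem.Dict Int Int :=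
  if d.contains x = false then d.insert x 1 else d.insert x (d.getD x 0 + 1)

-- A's second loop: starting_node = -1; first item with frequency 1 breaks
def pvPickA : List (Int × Int) → Int
  | [] => -1
  | (n, f) :: rest => if f == 1 then n else pvPickA rest

def get_starting_node (adjacentPairs : List (List Int)) : Int :=
  let frequencies := adjacentPairs.foldl
    (fun d pair =>
      pvBumpA (pvBumpA d (PySem.List.pyGetD pair 0 0)) (PySem.List.pyGetD pair 1 0))
    PySem.Dict.empty
  pvPickA frequencies.items

-- ===== PORT B =====
-- B's outer while loop over the sorted list: each iteration consumes one run of equal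
-- values (the inner 'while j' loop = takeWhile/dropWhile split, exact on a sorted run);
-- a run of length 1 adds its value to the set.
def pvSinglesLoop : List Int → PySem.Set Int → PySem.Set Int
  | [], acc => acc
  | x :: rest, acc =>
    pvSinglesLoop (rest.dropWhile (fun y => y == x))
      (if rest.takeWhile (fun y => y == x) = [] then PySem.Set.add acc x else acc)
termination_by s _ => s.length
decreasing_by
  simpa using Nat.lt_succ_of_le (List.length_dropWhile_le _ _)

-- B's final loop: first flat-order node in `singles`
def pvScanB (singles : PySem.Set Int) : List Int → Int
  | [] => -1
  | x :: rest => if PySem.Set.contains singles x then x else pvScanB singles rest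

def get_starting_node_alt (adjacentPairs : List (List Int)) : Int :=
  let nodes := adjacentPairs.foldl
    (fun ns pair => ns ++ [PySem.List.pyGetD pair 0 0, PySem.List.pyGetD pair 1 0]) []
  let s := PySem.List.sorted nodes (fun x => x) false
  let singles := pvSinglesLoop s PySem.Set.empty
  pvScanB singles nodes

-- ===== PRECONDITION & SPEC =====
-- Pre_ excludes exactly the inputs where a pair has fewer than two elements: there
-- pair[0] / pair[1] raise IndexError in A (and in B alike).
def Pre_get_starting_node (adjacentPairs : List (List Int)) : Prop :=
  ∀ pair ∈ adjacentPairs, 2 ≤ pair.length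
instance (adjacentPairs : List (List Int)) : Decidable (Pre_get_starting_node adjacentPairs) := by unfold Pre_get_starting_node; infer_instance
def pvWitness_get_starting_node : List (List Int) := [[1, 2], [2, 3]]

def Spec_get_starting_node (adjacentPairs : List (List Int)) (out : Int) : Prop := out = get_starting_node_alt adjacentPairs
instance (adjacentPairs : List (List Int)) (out : Int) : Decidable (Spec_get_starting_node adjacentPairs out) := by unfold Spec_get_starting_node; infer_instance

-- ===== CLAIM (what is proved, stated in full; the proofs are below) =====
def Claim_equal_get_starting_node : Prop := ∀ (adjacentPairs : List (List Int)), Dom_get_starting_node adjacentPairs → Pre_get_starting_node adjacentPairs → Spec_get_starting_node adjacentPairs (get_starting_node adjacentPairs)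

-- ===== LEMMAS AND PROOFS =====

-- the flat sequence of nodes in scan order: u0, v0, u1, v1, …
def pvSeq (adjacentPairs : List (List Int)) : List Int :=
  adjacentPairs.flatMap (fun pair => [PySem.List.pyGetD pair 0 0, PySem.List.pyGetD pair 1 0])

theorem pvSeq_cons (p : List Int) (l : List (List Int)) :
    pvSeq (p :: l) = PySem.List.pyGetD p 0 0 :: PySem.List.pyGetD p 1 0 :: pvSeq l := by
  simp [pvSeq]

-- a per-pair fold (body applied to pair[0] then pair[1]) is a fold over the flat sequence
theorem pvFoldl_flat {σ : Type} (f : σ → Int → σ) (l : List (List Int)) (init : σ) :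
    l.foldl (fun s pair => f (f s (PySem.List.pyGetD pair 0 0)) (PySem.List.pyGetD pair 1 0)) init
      = (pvSeq l).foldl f init := by
  induction l generalizing init with
  | nil => simp [pvSeq]
  | cons p rest ih => simp [pvSeq_cons, ih]

-- B's node-collecting loop builds exactly the flat sequence
theorem pvNodes_eq (l : List (List Int)) (acc : List Int) :
    l.foldl (fun ns pair => ns ++ [PySem.List.pyGetD pair 0 0, PySem.List.pyGetD pair 1 0]) acc
      = acc ++ pvSeq l := by
  induction l generalizing acc with
  | nil => simp [pvSeq]
  | cons p rest ih => simp [pvSeq_cons, ih]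

theorem pvBumpA_eq (d : PySem.Dict Int Int) (x : Int) :
    pvBumpA d x = d.insert x (d.getD x 0 + 1) := by
  unfold pvBumpA
  by_cases h : d.contains x = false
  · rw [if_pos h, PySem.Dict.getD_of_not_contains d (0 : Int) h]
    norm_num
  · rw [if_neg h]

theorem pvDictA_eq (l : List (List Int)) :
    l.foldl (fun d pair =>
        pvBumpA (pvBumpA d (PySem.List.pyGetD pair 0 0)) (PySem.List.pyGetD pair 1 0))
      PySem.Dict.empty = PySem.Dict.counter (pvSeq l) := by
  have hb : (fun (d : PySem.Dict Int Int) (pair : List Int) =>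
      pvBumpA (pvBumpA d (PySem.List.pyGetD pair 0 0)) (PySem.List.pyGetD pair 1 0))
      = (fun d pair =>
          (fun (d : PySem.Dict Int Int) (x : Int) => d.insert x (d.getD x 0 + 1))
            ((fun (d : PySem.Dict Int Int) (x : Int) => d.insert x (d.getD x 0 + 1)) d
              (PySem.List.pyGetD pair 0 0))
            (PySem.List.pyGetD pair 1 0)) := by
    funext d pair; simp [pvBumpA_eq]
  rw [hb, pvFoldl_flat (fun (d : PySem.Dict Int Int) (x : Int) => d.insert x (d.getD x 0 + 1)) l,
      PySem.Dict.foldl_insert_getD_add_one_eq_counter]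

theorem pvPickA_map (c : Int → Int) (l : List Int) :
    pvPickA (l.map (fun k => (k, c k))) = ((l.find? (fun k => c k == 1)).getD (-1)) := by
  induction l with
  | nil => simp [pvPickA]
  | cons x rest ih =>
    by_cases h : c x == 1
    · simp [pvPickA, h]
    · simp only [List.map_cons, pvPickA, h, Bool.false_eq_true, if_false, List.find?_cons]
      simpa [h] using ih

-- find? over a Set.add fold sees the accumulated list followed by the rest
theorem pvFind?_foldl_add (p : Int → Bool) (xs : List Int) (acc : PySem.Set Int) :
    List.find? p (xs.foldl PySem.Set.add acc) = List.find? p (acc ++ xs) := by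
  induction xs generalizing acc with
  | nil => simp
  | cons x rest ih =>
    rw [List.foldl_cons, ih]
    by_cases hm : x ∈ acc
    · rw [PySem.Set.add_of_mem hm]
      rcases hf : List.find? p acc with _ | y
      · have hx : p x = false := by
          have := List.find?_eq_none.mp hf x hm
          simpa using this
        simp [List.find?_append, hf, hx]
      · simp [List.find?_append, hf]
    · rw [PySem.Set.add_of_not_mem hm, List.append_assoc]
      rfl

theorem pvFind?_ofList (p : Int → Bool) (xs : List Int) :
    List.find? p (PySem.Set.ofList xs) = List.find? p xs := by
  rw [PySem.Set.ofList_eq_foldl, pvFind?_foldl_add]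
  simp

-- in a sorted list headed by x, everything past the leading run of x's is > x
theorem pvDropWhile_gt (x : Int) (rest : List Int)
    (h : (x :: rest).Pairwise (· ≤ ·)) :
    ∀ y ∈ rest.dropWhile (fun z => z == x), x < y := by
  induction rest with
  | nil => simp
  | cons z rest' ih =>
    intro y hy
    by_cases hz : (z == x) = true
    · have hzx : z = x := by simpa using hz
      subst hzx
      simp only [List.dropWhile_cons] at hy
      rw [if_pos hz] at hy
      have h' : (z :: rest').Pairwise (· ≤ ·) := by
        rcases List.pairwise_cons.mp h with ⟨h1, h2⟩
        exact List.pairwise_cons.mpr ⟨fun y' hy' => (List.pairwise_cons.mp h2).1 y' hy', (List.pairwise_cons.mp h2).2⟩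
      exact ih h' y hy
    · simp only [List.dropWhile_cons] at hy
      rw [if_neg hz] at hy
      have hxy : x ≤ y := (List.pairwise_cons.mp h).1 y hy
      rcases List.mem_cons.mp hy with hyz | hy'
      · subst hyz
        have : y ≠ x := by simpa using hz
        omega
      · have hzy : z ≤ y := (List.pairwise_cons.mp (List.pairwise_cons.mp h).2).1 y hy'
        have hxz : x ≤ z := (List.pairwise_cons.mp h).1 z (List.mem_cons_self)
        have hzx : z ≠ x := by simpa using hz
        omega

-- characterization of B's run-grouping loop on a sorted list
theorem pvMem_singlesLoop (s : List Int) (acc : PySem.Set Int) :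
    s.Pairwise (· ≤ ·) → ∀ (y : Int),
      (y ∈ pvSinglesLoop s acc ↔ y ∈ acc ∨ s.count y = 1) := by
  induction s, acc using pvSinglesLoop.induct with
  | case1 acc => intro _ y; simp [pvSinglesLoop]
  | case2 x rest acc ih =>
    intro hs y
    have htail : rest.Pairwise (· ≤ ·) := (List.pairwise_cons.mp hs).2
    have hdrop : (rest.dropWhile (fun z => z == x)).Pairwise (· ≤ ·) :=
      htail.sublist (List.dropWhile_sublist _)
    have hgt := pvDropWhile_gt x rest hs
    have hcx : (rest.dropWhile (fun z => z == x)).count x = 0 := by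
      rw [List.count_eq_zero]
      intro hmem
      exact absurd (hgt x hmem) (lt_irrefl x)
    have hsplit : rest = rest.takeWhile (fun z => z == x) ++ rest.dropWhile (fun z => z == x) :=
      (List.takeWhile_append_dropWhile).symm
    have htakeC : ∀ z ∈ rest.takeWhile (fun z => z == x), z = x := by
      intro z hz
      have := List.mem_takeWhile_imp hz
      simpa using this
    have ihy := ih hdrop
    have ihy' := ihy y
    rw [pvSinglesLoop]
    by_cases htw : rest.takeWhile (fun z => z == x) = []
    · -- run of length 1: x is added to the set
      rw [dif_pos htw] at ihy'
      rw [if_pos htw, ihy', PySem.Set.mem_add]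
      have hrest : rest = rest.dropWhile (fun z => z == x) := by
        conv_lhs => rw [hsplit, htw]
        simp
      have hcr : rest.count x = 0 := by rw [hrest]; exact hcx
      by_cases hyx : y = x
      · have hc1 : (x :: rest).count y = 1 := by
          rw [hyx, List.count_cons_self, hcr]
        have hcd : (rest.dropWhile (fun z => z == x)).count y = 0 := by
          rw [hyx]; exact hcx
        rw [hc1, hcd]
        simp [hyx]
      · have hcc : (x :: rest).count y = (rest.dropWhile (fun z => z == x)).count y := by
          rw [List.count_cons_of_ne (Ne.symm hyx)]
          conv_lhs => rw [hrest]
        rw [hcc]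
        tauto
    · -- run of length ≥ 2: nothing added
      rw [dif_neg htw] at ihy'
      rw [if_neg htw, ihy']
      by_cases hyx : y = x
      · rcases List.exists_cons_of_ne_nil htw with ⟨z, tw', htw'⟩
        have hz : z = x := htakeC z (by rw [htw']; exact List.mem_cons_self)
        have hzmem : z ∈ rest := by
          rw [hsplit, htw']; exact List.mem_append_left _ List.mem_cons_self
        have h1 : 0 < rest.count x := List.count_pos_iff.mpr (hz ▸ hzmem)
        have hc2 : (x :: rest).count y ≠ 1 := by
          rw [hyx, List.count_cons_self]; omega
        have hcd : (rest.dropWhile (fun z => z == x)).count y = 0 := by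
          rw [hyx]; exact hcx
        rw [hcd]
        constructor
        · rintro (h | h)
          · exact Or.inl h
          · omega
        · rintro (h | h)
          · exact Or.inl h
          · exact absurd h hc2
      · have hct : (rest.takeWhile (fun z => z == x)).count y = 0 := by
          rw [List.count_eq_zero]
          intro hm
          exact hyx (htakeC y hm)
        have hcc : (x :: rest).count y = (rest.dropWhile (fun z => z == x)).count y := by
          conv_lhs => rw [hsplit]
          rw [List.count_cons_of_ne (Ne.symm hyx), List.count_append, hct]
          omega
        rw [hcc]

theorem pvScanB_eq (singles : PySem.Set Int) (ns : List Int) :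
    pvScanB singles ns = ((ns.find? (fun x => PySem.Set.contains singles x)).getD (-1)) := by
  induction ns with
  | nil => simp [pvScanB]
  | cons x rest ih =>
    unfold pvScanB
    by_cases h : PySem.Set.contains singles x = true
    · rw [if_pos h, List.find?_cons_of_pos (by simpa using h)]
      simp
    · rw [if_neg h, List.find?_cons_of_neg (by simpa using (Bool.not_eq_true _).mp h)]
      exact ih

-- ===== VERDICT (by name: the statement is the Claim_ definition above) =====
theorem get_starting_node_spec : Claim_equal_get_starting_node := by
  intro l _ _
  unfold Spec_get_starting_node get_starting_node get_starting_node_alt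
  simp only []
  rw [pvDictA_eq, PySem.Dict.items_counter,
      pvPickA_map (fun k => ((pvSeq l).count k : Int)) (PySem.Set.ofList (pvSeq l)),
      pvFind?_ofList, pvNodes_eq l [], List.nil_append, pvScanB_eq]
  have hfun : (fun x => PySem.Set.contains
        (pvSinglesLoop (PySem.List.sorted (pvSeq l) (fun x => x) false) PySem.Set.empty) x)
      = (fun k => (((pvSeq l).count k : Int) == 1)) := by
    funext x
    have hsorted : (PySem.List.sorted (pvSeq l) (fun x => x) false).Pairwise (· ≤ ·) := by
      simpa using PySem.List.sorted_pairwise (pvSeq l) (fun x => x)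
    have hperm : (PySem.List.sorted (pvSeq l) (fun x => x) false).Perm (pvSeq l) :=
      PySem.List.sorted_perm (pvSeq l) (fun x => x) false
    have hinv := pvMem_singlesLoop _ PySem.Set.empty hsorted x
    rw [Bool.eq_iff_iff, beq_iff_eq, PySem.Set.contains_iff, hinv, hperm.count_eq]
    simp [PySem.Set.empty]
  rw [hfun]
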